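-- pv_equiv track=rewrite | github.com/PedroBernini/game_circle-the-cat-best-first-search | cat.py | organizarCaminhos
-- ===== SOURCE A (Python) =====
-- def organizarCaminhos(caminhosSaidas) :
--     elementos = len(caminhosSaidas)-1
--     ordenado = False
--     while not ordenado :
--         ordenado = True
--         for i in range(elementos) :
--           if len(caminhosSaidas[i]) > len(caminhosSaidas[i + 1]) :
--                 temp = caminhosSaidas[i]
--                 caminhosSaidas[i] = caminhosSaidas[i + 1]
--                 caminhosSaidas[i + 1] = temp
--                 ordenado = False
--     return caminhosSaidas
-- ===== SOURCE B (Python) =====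
-- def organizarCaminhos(caminhosSaidas):
--     caminhosSaidas[:] = sorted(caminhosSaidas, key=len)
--     return caminhosSaidas
-- ===== Notes on version B (the rewrite author's own statement) =====
-- stated objective: simpler
-- what changed: Replaces the hand-written repeated-pass bubble sort with a single call to the built-in stable sort (sorted with key=len), written back in place via slice assignment so the argument is mutated and returned exactly as A does.
import Mathlib
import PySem

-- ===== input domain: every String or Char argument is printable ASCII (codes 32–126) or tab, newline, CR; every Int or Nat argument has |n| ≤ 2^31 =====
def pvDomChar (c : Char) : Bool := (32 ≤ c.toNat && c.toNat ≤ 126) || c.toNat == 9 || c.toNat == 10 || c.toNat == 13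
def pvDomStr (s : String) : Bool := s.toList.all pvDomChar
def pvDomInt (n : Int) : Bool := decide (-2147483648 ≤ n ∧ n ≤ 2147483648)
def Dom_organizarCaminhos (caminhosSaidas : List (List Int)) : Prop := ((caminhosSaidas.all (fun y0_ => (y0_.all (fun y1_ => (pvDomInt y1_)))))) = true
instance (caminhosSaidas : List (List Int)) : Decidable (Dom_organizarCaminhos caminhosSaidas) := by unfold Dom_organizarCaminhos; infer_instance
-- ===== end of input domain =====

-- B replaces A's repeated-pass bubble sort by one call to Python's built-in stable sort
-- (sorted with key=len), written back in place so the argument is mutated exactly as A's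
-- swaps mutate it; the equivalence proved here is about the RETURN value.

-- ===== PORT A =====
-- one pass of the inner 'for i in range(elementos)' loop: state = (the list, ordenado)
def pyPass (l : List (List Int)) : List (List Int) × Bool :=
  (PySem.List.pyRange 0 ((l.length : Int) - 1) 1).foldl
    (fun st i =>
      if (PySem.List.pyGetD st.1 i []).length > (PySem.List.pyGetD st.1 (i + 1) []).length then
        -- temp = xs[i]; xs[i] = xs[i+1]; xs[i+1] = temp; ordenado = False
        (PySem.List.pySetD (PySem.List.pySetD st.1 i (PySem.List.pyGetD st.1 (i + 1) []))
          (i + 1) (PySem.List.pyGetD st.1 i []), false)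
      else st)
    (l, true)

-- the 'while not ordenado' loop; the fuel is only a totality guard: the proofs below show
-- the loop stops (ordenado stays True) within length^2 + 1 passes, so it is never exhausted
def loopA : Nat → List (List Int) → List (List Int)
  | 0, l => l
  | f + 1, l =>
    let r := pyPass l
    if r.2 then r.1 else loopA f r.1

def organizarCaminhos (caminhosSaidas : List (List Int)) : List (List Int) :=
  loopA (caminhosSaidas.length * caminhosSaidas.length + 1) caminhosSaidas

-- ===== PORT B =====
def organizarCaminhos_alt (caminhosSaidas : List (List Int)) : List (List Int) :=
  PySem.List.sorted caminhosSaidas (fun x => (x.length : Int)) false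

-- ===== PRECONDITION & SPEC =====
def Spec_organizarCaminhos (caminhosSaidas : List (List Int)) (out : List (List Int)) : Prop := out = organizarCaminhos_alt caminhosSaidas
instance (caminhosSaidas : List (List Int)) (out : List (List Int)) : Decidable (Spec_organizarCaminhos caminhosSaidas out) := by unfold Spec_organizarCaminhos; infer_instance

-- ===== CLAIM (what is proved, stated in full; the proofs are below) =====
def Claim_equal_organizarCaminhos : Prop := ∀ (caminhosSaidas : List (List Int)), Dom_organizarCaminhos caminhosSaidas → Spec_organizarCaminhos caminhosSaidas (organizarCaminhos caminhosSaidas)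

-- ===== LEMMAS AND PROOFS =====

-- structural form of one bubble pass, generic in the key
def gpass {α : Type} (key : α → Nat) : List α → List α × Bool
  | [] => ([], true)
  | [a] => ([a], true)
  | a :: b :: t =>
    if key b < key a then (b :: (gpass key (a :: t)).1, false)
    else (a :: (gpass key (b :: t)).1, (gpass key (b :: t)).2)
  termination_by l => l.length
  decreasing_by all_goals simp

def gloop {α : Type} (key : α → Nat) : Nat → List α → List α
  | 0, l => l
  | f + 1, l =>
    let r := gpass key l
    if r.2 then r.1 else gloop key f r.1

-- number of inversions (the termination measure of the while loop)
def ginv {α : Type} (key : α → Nat) : List α → Nat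
  | [] => 0
  | a :: t => t.countP (fun b => key b < key a) + ginv key t

def klen : List Int → Nat := fun x => x.length
def ktag : List Int × Nat → Nat := fun p => p.1.length
-- equal-length tagged elements stay in index order
def Estable (a b : List Int × Nat) : Prop := a.1.length = b.1.length → a.2 < b.2
def ltT (a b : List Int × Nat) : Prop :=
  a.1.length < b.1.length ∨ (a.1.length = b.1.length ∧ a.2 < b.2)

lemma set_append_len {α : Type} (pre : List α) (x : α) (r : List α) (v : α) :
    (pre ++ x :: r).set pre.length v = pre ++ v :: r := by
  induction pre with
  | nil => simp
  | cons p ps ih => simp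

lemma getD_append_len {α : Type} (pre : List α) (x : α) (r : List α) (d : α) :
    (pre ++ x :: r).getD pre.length d = x := by
  induction pre with
  | nil => simp
  | cons p ps ih => simp

-- the indexed foldl pass over a settled prefix equals the structural pass on the rest
lemma pyPass_from (N : Nat) : ∀ (rest : List (List Int)), rest.length ≤ N →
    ∀ (pre : List (List Int)) (flag : Bool),
    (PySem.List.pyRange (pre.length : Int) (((pre.length + rest.length : Nat) : Int) - 1) 1).foldl
      (fun st i =>
        if (PySem.List.pyGetD st.1 i []).length > (PySem.List.pyGetD st.1 (i + 1) []).length then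
          (PySem.List.pySetD (PySem.List.pySetD st.1 i (PySem.List.pyGetD st.1 (i + 1) []))
            (i + 1) (PySem.List.pyGetD st.1 i []), false)
        else st)
      (pre ++ rest, flag)
    = (pre ++ (gpass klen rest).1, flag && (gpass klen rest).2) := by
  induction N with
  | zero =>
    intro rest hr pre flag
    have : rest = [] := List.length_eq_zero_iff.mp (Nat.le_zero.mp hr)
    subst this
    rw [PySem.List.pyRange_one_eq_nil (by simp; try omega)]
    simp [gpass]
  | succ N ih =>
    intro rest hr pre flag
    match rest with
    | [] =>
      rw [PySem.List.pyRange_one_eq_nil (by simp; try omega)]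
      simp [gpass]
    | [a] =>
      rw [PySem.List.pyRange_one_eq_nil (by simp; try omega)]
      simp [gpass]
    | a :: b :: t =>
      rw [PySem.List.pyRange_one_cons (by simp; omega)]
      rw [List.foldl_cons]
      have hga : PySem.List.pyGetD (pre ++ a :: b :: t) (pre.length : Int) ([] : List Int) = a := by
        rw [PySem.List.pyGetD_natCast]; exact getD_append_len pre a (b :: t) []
      have hgb : PySem.List.pyGetD (pre ++ a :: b :: t) ((pre.length : Int) + 1) ([] : List Int) = b := by
        have h1 : ((pre.length : Int) + 1) = (((pre ++ [a]).length : Nat) : Int) := by simp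
        rw [h1, PySem.List.pyGetD_natCast]
        have : pre ++ a :: b :: t = (pre ++ [a]) ++ b :: t := by simp
        rw [this]; exact getD_append_len (pre ++ [a]) b t []
      by_cases hc : b.length < a.length
      · have hcond : (PySem.List.pyGetD (pre ++ a :: b :: t) (pre.length : Int) ([] : List Int)).length >
            (PySem.List.pyGetD (pre ++ a :: b :: t) ((pre.length : Int) + 1) ([] : List Int)).length := by
          rw [hga, hgb]; exact hc
        rw [if_pos hcond, hga, hgb]
        have hs1 : PySem.List.pySetD (pre ++ a :: b :: t) (pre.length : Int) b = pre ++ b :: b :: t := by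
          rw [PySem.List.pySetD_natCast]; exact set_append_len pre a (b :: t) b
        rw [hs1]
        have hs2 : PySem.List.pySetD (pre ++ b :: b :: t) ((pre.length : Int) + 1) a = pre ++ b :: a :: t := by
          have h1 : ((pre.length : Int) + 1) = (((pre ++ [b]).length : Nat) : Int) := by simp
          rw [h1, PySem.List.pySetD_natCast]
          have h2 : pre ++ b :: b :: t = (pre ++ [b]) ++ b :: t := by simp
          rw [h2, set_append_len (pre ++ [b]) b t a]; simp
        rw [hs2]
        have hpre : pre ++ b :: a :: t = (pre ++ [b]) ++ a :: t := by simp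
        have hlen : ((pre.length : Int) + 1) = (((pre ++ [b]).length : Nat) : Int) := by simp
        have hbound : (((pre.length + (a :: b :: t).length : Nat) : Int) - 1)
            = ((((pre ++ [b]).length + (a :: t).length : Nat) : Int) - 1) := by push_cast; simp; omega
        rw [hpre, hlen, hbound, ih (a :: t) (by simp at hr ⊢; omega) (pre ++ [b]) false]
        simp [gpass, klen, hc]
      · have hcond : ¬ ((PySem.List.pyGetD (pre ++ a :: b :: t) (pre.length : Int) ([] : List Int)).length >
            (PySem.List.pyGetD (pre ++ a :: b :: t) ((pre.length : Int) + 1) ([] : List Int)).length) := by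
          rw [hga, hgb]; exact hc
        rw [if_neg hcond]
        have hpre : pre ++ a :: b :: t = (pre ++ [a]) ++ b :: t := by simp
        have hlen : ((pre.length : Int) + 1) = (((pre ++ [a]).length : Nat) : Int) := by simp
        have hbound : (((pre.length + (a :: b :: t).length : Nat) : Int) - 1)
            = ((((pre ++ [a]).length + (b :: t).length : Nat) : Int) - 1) := by push_cast; simp; omega
        rw [hpre, hlen, hbound, ih (b :: t) (by simp at hr ⊢; omega) (pre ++ [a]) flag]
        simp [gpass, klen, hc]

lemma pyPass_eq_gpass (l : List (List Int)) : pyPass l = gpass klen l := by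
  have h := pyPass_from l.length l (le_refl _) [] true
  simp only [List.nil_append, List.length_nil, Nat.cast_zero, Nat.zero_add, Bool.true_and] at h
  unfold pyPass
  rw [show ((0 : Int)) = ((List.length ([] : List (List Int)) : Nat) : Int) by simp] at *
  simpa using h

lemma loopA_eq_gloop (f : Nat) : ∀ l, loopA f l = gloop klen f l := by
  induction f with
  | zero => intro l; rfl
  | succ f ih =>
    intro l
    simp only [loopA, gloop, pyPass_eq_gpass]
    split <;> simp [ih]

-- projection of the tagged pass/loop onto the data
lemma gpass_map {α β : Type} (f : α → β) (key : β → Nat) (N : Nat) :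
    ∀ t : List α, t.length ≤ N →
    gpass key (t.map f) = ((gpass (fun x => key (f x)) t).1.map f, (gpass (fun x => key (f x)) t).2) := by
  induction N with
  | zero =>
    intro t ht
    have : t = [] := List.length_eq_zero_iff.mp (Nat.le_zero.mp ht)
    subst this; simp [gpass]
  | succ N ih =>
    intro t ht
    match t with
    | [] => simp [gpass]
    | [a] => simp [gpass]
    | a :: b :: t =>
      simp only [List.map_cons, gpass]
      by_cases hc : key (f b) < key (f a)
      · rw [if_pos hc, if_pos hc]
        have := ih (a :: t) (by simp at ht ⊢; omega)
        simp only [List.map_cons] at this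
        rw [this]
        simp
      · rw [if_neg hc, if_neg hc]
        have := ih (b :: t) (by simp at ht ⊢; omega)
        simp only [List.map_cons] at this
        rw [this]
        simp

lemma gloop_map {α β : Type} (f : α → β) (key : β → Nat) (F : Nat) :
    ∀ t : List α, gloop key F (t.map f) = (gloop (fun x => key (f x)) F t).map f := by
  induction F with
  | zero => intro t; rfl
  | succ F ih =>
    intro t
    simp only [gloop, gpass_map f key t.length t (le_refl _)]
    split <;> simp_all

lemma gpass_perm {α : Type} (key : α → Nat) (N : Nat) :
    ∀ t : List α, t.length ≤ N → (gpass key t).1.Perm t := by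
  induction N with
  | zero =>
    intro t ht
    have : t = [] := List.length_eq_zero_iff.mp (Nat.le_zero.mp ht)
    subst this; simp [gpass]
  | succ N ih =>
    intro t ht
    match t with
    | [] => simp [gpass]
    | [a] => simp [gpass]
    | a :: b :: t =>
      simp only [gpass]
      by_cases hc : key b < key a
      · rw [if_pos hc]
        exact ((ih (a :: t) (by simp at ht ⊢; omega)).cons b).trans (List.Perm.swap a b t)
      · rw [if_neg hc]
        exact (ih (b :: t) (by simp at ht ⊢; omega)).cons a

lemma gpass_stable (N : Nat) :
    ∀ t : List (List Int × Nat), t.length ≤ N → t.Pairwise Estable →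
    (gpass ktag t).1.Pairwise Estable := by
  induction N with
  | zero =>
    intro t ht _
    have : t = [] := List.length_eq_zero_iff.mp (Nat.le_zero.mp ht)
    subst this; simp [gpass]
  | succ N ih =>
    intro t ht hp
    match t with
    | [] => simp [gpass]
    | [a] => simp [gpass]
    | a :: b :: t =>
      rw [List.pairwise_cons] at hp
      obtain ⟨ha, hp⟩ := hp
      rw [List.pairwise_cons] at hp
      obtain ⟨hb, hp⟩ := hp
      simp only [gpass]
      by_cases hc : ktag b < ktag a
      · rw [if_pos hc]
        refine List.pairwise_cons.mpr ⟨?_, ?_⟩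
        · intro c hcmem
          have hcmem' : c ∈ a :: t := (gpass_perm ktag (a :: t).length (a :: t) (le_refl _)).mem_iff.mp hcmem
          rcases hcmem' with _ | h
          · intro heq; exact absurd heq (by unfold Estable ktag at *; omega)
          · exact hb c (by assumption)
        · exact ih (a :: t) (by simp at ht ⊢; omega)
            (List.pairwise_cons.mpr ⟨fun c hc' => ha c (List.mem_cons_of_mem b hc'), hp⟩)
      · rw [if_neg hc]
        refine List.pairwise_cons.mpr ⟨?_, ?_⟩
        · intro c hcmem
          have hcmem' : c ∈ b :: t := (gpass_perm ktag (b :: t).length (b :: t) (le_refl _)).mem_iff.mp hcmem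
          rcases hcmem' with _ | h
          · exact ha b (List.mem_cons_self)
          · exact ha c (List.mem_cons_of_mem b (by assumption))
        · exact ih (b :: t) (by simp at ht ⊢; omega) (List.pairwise_cons.mpr ⟨hb, hp⟩)

lemma gpass_sorted_of_flag {α : Type} (key : α → Nat) (N : Nat) :
    ∀ t : List α, t.length ≤ N → (gpass key t).2 = true →
    (gpass key t).1 = t ∧ t.Pairwise (fun a b => key a ≤ key b) := by
  induction N with
  | zero =>
    intro t ht _
    have : t = [] := List.length_eq_zero_iff.mp (Nat.le_zero.mp ht)
    subst this; simp [gpass]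
  | succ N ih =>
    intro t ht hf
    match t with
    | [] => simp [gpass]
    | [a] => simp [gpass]
    | a :: b :: t =>
      simp only [gpass] at hf ⊢
      by_cases hc : key b < key a
      · rw [if_pos hc] at hf; simp at hf
      · rw [if_neg hc] at hf ⊢
        simp only at hf
        obtain ⟨heq, hpw⟩ := ih (b :: t) (by simp at ht ⊢; omega) hf
        refine ⟨by simp [heq], ?_⟩
        rw [List.pairwise_cons] at hpw ⊢
        obtain ⟨hb, hp⟩ := hpw
        refine ⟨?_, List.pairwise_cons.mpr ⟨hb, hp⟩⟩
        intro c hcmem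
        rcases hcmem with _ | h
        · omega
        · have := hb c (by assumption); omega

lemma gpass_inv {α : Type} (key : α → Nat) (N : Nat) :
    ∀ t : List α, t.length ≤ N →
    ginv key (gpass key t).1 + (if (gpass key t).2 then 0 else 1) ≤ ginv key t := by
  induction N with
  | zero =>
    intro t ht
    have : t = [] := List.length_eq_zero_iff.mp (Nat.le_zero.mp ht)
    subst this; simp [gpass, ginv]
  | succ N ih =>
    intro t ht
    match t with
    | [] => simp [gpass, ginv]
    | [a] => simp [gpass, ginv]
    | a :: b :: t =>
      simp only [gpass]
      by_cases hc : key b < key a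
      · rw [if_pos hc]
        simp only [if_neg (Bool.false_ne_true), ginv]
        have hperm : (gpass key (a :: t)).1.Perm (a :: t) :=
          gpass_perm key (a :: t).length (a :: t) (le_refl _)
        have hcount : (gpass key (a :: t)).1.countP (fun c => key c < key b)
            = (a :: t).countP (fun c => key c < key b) := hperm.countP_eq _
        have hihv := ih (a :: t) (by simp at ht ⊢; omega)
        simp only [ginv] at hihv ⊢
        rw [hcount]
        have hca : (a :: t).countP (fun c => decide (key c < key b)) = t.countP (fun c => decide (key c < key b)) := by
          rw [List.countP_cons]; simp [Nat.not_lt.mpr (Nat.le_of_lt hc)]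
        have hcb : (b :: t).countP (fun c => decide (key c < key a)) = t.countP (fun c => decide (key c < key a)) + 1 := by
          rw [List.countP_cons]; simp [hc]
        simp only [] at *
        rw [hca, hcb]
        split at hihv <;> omega
      · rw [if_neg hc]
        have hperm : (gpass key (b :: t)).1.Perm (b :: t) :=
          gpass_perm key (b :: t).length (b :: t) (le_refl _)
        have hcount : (gpass key (b :: t)).1.countP (fun c => key c < key a)
            = (b :: t).countP (fun c => key c < key a) := hperm.countP_eq _
        have hihv := ih (b :: t) (by simp at ht ⊢; omega)
        simp only [ginv] at hihv ⊢
        rw [hcount]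
        by_cases hf : (gpass key (b :: t)).2 = true
        · simp only [hf, if_true] at hihv ⊢
          omega
        · simp only [hf, if_false, Bool.false_eq_true] at hihv ⊢
          omega

lemma ginv_le_sq {α : Type} (key : α → Nat) : ∀ t : List α, ginv key t ≤ t.length * t.length := by
  intro t
  induction t with
  | nil => simp [ginv]
  | cons a t ih =>
    simp only [ginv, List.length_cons]
    have h1 : t.countP (fun b => key b < key a) ≤ t.length := List.countP_le_length
    have h2 : (t.length + 1) * (t.length + 1) = t.length * t.length + 2 * t.length + 1 := by ring
    omega

lemma gloop_correct (F : Nat) :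
    ∀ t : List (List Int × Nat), ginv ktag t < F → t.Pairwise Estable →
    (gloop ktag F t).Perm t ∧ (gloop ktag F t).Pairwise ltT := by
  induction F with
  | zero => intro t h _; omega
  | succ F ih =>
    intro t hF hp
    simp only [gloop]
    by_cases hfl : (gpass ktag t).2 = true
    · rw [if_pos hfl]
      obtain ⟨heq, hle⟩ := gpass_sorted_of_flag ktag t.length t (le_refl _) hfl
      rw [heq]
      refine ⟨List.Perm.refl t, ?_⟩
      exact (hle.and hp).imp (fun {a b} h => by
        obtain ⟨h1, h2⟩ := h
        unfold ktag at h1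
        unfold Estable at h2
        unfold ltT
        omega)
    · rw [if_neg hfl]
      have hdec := gpass_inv ktag t.length t (le_refl _)
      rw [if_neg hfl] at hdec
      have hstab := gpass_stable t.length t (le_refl _) hp
      have hih := ih (gpass ktag t).1 (by omega) hstab
      exact ⟨hih.1.trans (gpass_perm ktag t.length t (le_refl _)), hih.2⟩

-- the tagged input: zipIdx, with its two invariants
lemma zipIdx_pairwise_idx {α : Type} (l : List α) : ∀ k : Nat, (l.zipIdx k).Pairwise (fun a b => a.2 < b.2) := by
  induction l with
  | nil => intro k; simp
  | cons a t ih =>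
    intro k
    rw [List.zipIdx_cons, List.pairwise_cons]
    refine ⟨?_, ih (k + 1)⟩
    intro p hp
    obtain ⟨x, i⟩ := p
    have := List.mem_zipIdx hp
    simp at this ⊢
    omega

lemma zipIdx_idx_lt {α : Type} (l : List α) (p : α × Nat) (hp : p ∈ l.zipIdx) : p.2 < l.length := by
  obtain ⟨x, i⟩ := p
  have := List.mem_zipIdx hp
  omega

-- the encoding key: strict ltT on index-bounded tagged lists is strict < on keyEnc
def keyEnc (n : Nat) (p : List Int × Nat) : Nat := p.1.length * n + p.2

lemma ltT_keyEnc {n : Nat} {a b : List Int × Nat} (ha : a.2 < n) (h : ltT a b) :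
    keyEnc n a < keyEnc n b := by
  unfold keyEnc
  unfold ltT at h
  rcases h with h | ⟨h1, h2⟩
  · have : (a.1.length + 1) * n ≤ b.1.length * n := Nat.mul_le_mul_right n (by omega)
    have he : (a.1.length + 1) * n = a.1.length * n + n := by ring
    omega
  · rw [h1]; omega

-- insertBy with the encoded key, projected, is insertBy with the Int length key
lemma insertBy_proj (n : Nat) (x : List Int) (i : Nat) (hi : i < n) :
    ∀ acc : List (List Int × Nat), (∀ y ∈ acc, y.2 < i) →
    (PySem.List.insertBy (fun a b => decide (keyEnc n a < keyEnc n b)) (x, i) acc).map Prod.fst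
      = PySem.List.insertBy (fun a b => decide ((a.length : Int) < (b.length : Int))) x (acc.map Prod.fst) := by
  intro acc
  induction acc with
  | nil => intro _; simp [PySem.List.insertBy]
  | cons y acc ih =>
    intro hlt
    obtain ⟨z, j⟩ := y
    have hj : j < i := hlt (z, j) List.mem_cons_self
    have hcond : (keyEnc n (x, i) < keyEnc n (z, j)) ↔ ((x.length : Int) < (z.length : Int)) := by
      unfold keyEnc
      simp only [Nat.cast_lt]
      constructor
      · intro h
        by_contra hle
        have hzx : z.length ≤ x.length := by omega
        have : z.length * n + j < x.length * n + i := by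
          have := Nat.mul_le_mul_right n hzx; omega
        omega
      · intro h
        have : (x.length + 1) * n ≤ z.length * n := Nat.mul_le_mul_right n (by omega)
        have he : (x.length + 1) * n = x.length * n + n := by ring
        omega
    simp only [PySem.List.insertBy, List.map_cons]
    by_cases hc : keyEnc n (x, i) < keyEnc n (z, j)
    · rw [if_pos (by simpa using hc), if_pos (by simpa using hcond.mp hc)]
      simp
    · rw [if_neg (by simpa using hc), if_neg (by simpa using (fun h => hc (hcond.mpr h)))]
      simp only [List.map_cons, List.cons.injEq, true_and]
      exact ih (fun y hy => hlt y (List.mem_cons_of_mem _ hy))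

-- the whole insertion-sort fold commutes with the projection
lemma fold_insert_proj (n : Nat) :
    ∀ (rest : List (List Int)) (k : Nat) (acc : List (List Int × Nat)),
    (∀ y ∈ acc, y.2 < k) → k + rest.length ≤ n →
    ((rest.zipIdx k).foldl (fun a p => PySem.List.insertBy (fun a b => decide (keyEnc n a < keyEnc n b)) p a) acc).map Prod.fst
      = rest.foldl (fun a x => PySem.List.insertBy (fun a b => decide ((a.length : Int) < (b.length : Int))) x a) (acc.map Prod.fst) := by
  intro rest
  induction rest with
  | nil => intro k acc _ _; simp
  | cons x r ih =>
    intro k acc hacc hkn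
    rw [List.zipIdx_cons, List.foldl_cons, List.foldl_cons]
    have hk : k < n := by simp at hkn; omega
    rw [← insertBy_proj n x k hk acc hacc]
    apply ih (k + 1)
    · intro y hy
      rcases (PySem.List.mem_insertBy _ _ _ _).mp hy with h | h
      · rw [h]; omega
      · exact Nat.lt_succ_of_lt (hacc y h)
    · simp at hkn ⊢; omega

lemma sorted_tag_proj (l : List (List Int)) :
    (PySem.List.sorted l.zipIdx (keyEnc l.length) false).map Prod.fst
      = PySem.List.sorted l (fun x => (x.length : Int)) false := by
  rw [PySem.List.sorted_eq_foldl_insertBy, PySem.List.sorted_eq_foldl_insertBy]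
  exact fold_insert_proj l.length l 0 [] (by simp) (by simp)

-- ===== VERDICT (by name: the statement is the Claim_ definition above) =====
theorem organizarCaminhos_spec : Claim_equal_organizarCaminhos := by
  intro l _
  unfold Spec_organizarCaminhos organizarCaminhos organizarCaminhos_alt
  set F := l.length * l.length + 1 with hF
  -- A's loop = the generic bubble loop
  rw [loopA_eq_gloop]
  -- lift to the tagged list
  have hmapfst : l.zipIdx.map Prod.fst = l := by
    induction l with
    | nil => simp
    | cons a t ih => simp
  have hktag : (fun x : List Int × Nat => klen (Prod.fst x)) = ktag := rfl
  have hproj : gloop klen F l = (gloop ktag F l.zipIdx).map Prod.fst := by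
    conv_lhs => rw [← hmapfst]
    rw [gloop_map Prod.fst klen F l.zipIdx, hktag]
  rw [hproj]
  -- the tagged loop result is the unique strictly keyEnc-increasing permutation of the tag
  have hinv : ginv ktag l.zipIdx < F := by
    have h1 := ginv_le_sq ktag l.zipIdx
    simp only [List.length_zipIdx] at h1
    omega
  have hpE : l.zipIdx.Pairwise Estable := by
    exact (zipIdx_pairwise_idx l 0).imp (fun {a b} h => fun _ => h)
  obtain ⟨hperm, hpw⟩ := gloop_correct F l.zipIdx hinv hpE
  have hidx : ∀ p ∈ gloop ktag F l.zipIdx, p.2 < l.length :=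
    fun p hp => zipIdx_idx_lt l p (hperm.mem_iff.mp hp)
  have henc : (gloop ktag F l.zipIdx).Pairwise
      (fun a b => keyEnc l.length a < keyEnc l.length b) := by
    apply List.Pairwise.imp_of_mem ?_ hpw
    intro a b hamem _ h
    exact ltT_keyEnc (hidx a hamem) h
  have hsorted : PySem.List.sorted l.zipIdx (keyEnc l.length) false = gloop ktag F l.zipIdx :=
    PySem.List.sorted_eq_of_perm_of_pairwise_lt _ _ _ hperm henc
  rw [← hsorted, sorted_tag_proj]
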